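-- pv_equiv track=rewrite | github.com/spitfiresb/CS-211 | Project04_Waldo/waldo.py | all_col_exists_waldo
-- ===== SOURCE A (Python) =====
-- Waldo = 'W'
--
-- def all_col_exists_waldo(doob: list[list]) -> bool:
--     if len(doob) == 0:
--         return True
--     for col in range(len(doob[0])):
--         var = False
--         for row in range(len(doob)):
--             if doob[row][col] == Waldo:
--                 var = True
--                 break
--         if not var:
--             return False
--     return True
--
--
--     """for row in doob:
--         for col in row:
--             if Waldo not in col:
--                 return False
--             else:
--                 return True"""
-- ===== SOURCE B (Python) =====
-- Waldo = 'W'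
--
-- def all_col_exists_waldo(doob: list[list]) -> bool:
--     if len(doob) == 0:
--         return True
--     ncols = len(doob[0])
--     found = set()
--     for row in doob:
--         for col in range(ncols):
--             if row[col] == Waldo:
--                 found.add(col)
--     return len(found) == ncols
-- ===== Notes on version B (the rewrite author's own statement) =====
-- stated objective: alternative
-- what changed: Replaces A's column-major nested scan (restarting a row scan per column, with break/early return) by a single row-major streaming pass that accumulates the set of columns seen to contain 'W' and compares its size to the column count at the end.
-- outside the precondition, e.g. on all_col_exists_waldo([['W', 'W'], ['x']]): A returns True, B raises IndexError
import Mathlib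
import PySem

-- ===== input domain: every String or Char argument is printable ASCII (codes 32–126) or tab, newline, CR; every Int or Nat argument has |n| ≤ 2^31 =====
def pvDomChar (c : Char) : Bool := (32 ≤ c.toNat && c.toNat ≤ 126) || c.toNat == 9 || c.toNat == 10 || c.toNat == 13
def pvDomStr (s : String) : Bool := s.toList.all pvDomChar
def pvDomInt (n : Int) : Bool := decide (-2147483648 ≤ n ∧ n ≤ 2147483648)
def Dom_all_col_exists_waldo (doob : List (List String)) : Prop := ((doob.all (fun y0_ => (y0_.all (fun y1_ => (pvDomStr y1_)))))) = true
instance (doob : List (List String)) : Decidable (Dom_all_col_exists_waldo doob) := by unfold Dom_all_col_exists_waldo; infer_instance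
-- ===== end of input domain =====

-- B replaces A's column-major nested scan by one row-major pass maintaining the set of
-- columns already seen to contain 'W' (alternative decomposition, same asymptotic cost).


-- ===== PORT A =====
-- inner loop 'for row in range(len(doob)): if doob[row][col] == Waldo: var = True; break'
-- (break on first hit = return true at the first matching row); doob[row][col] is in range
-- under Pre_, the default "" is never read there
def pvAInner (col : Nat) : List (List String) → Bool
  | [] => false
  | row :: rest =>
      if PySem.List.pyGetD row (Int.ofNat col) "" = "W" then true else pvAInner col rest

-- outer loop 'for col in range(len(doob[0])): …; if not var: return False'
def pvAOuter (doob : List (List String)) : List Nat → Bool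
  | [] => true
  | c :: cs => if pvAInner c doob then pvAOuter doob cs else false

def all_col_exists_waldo (doob : List (List String)) : Bool :=
  if doob.length = 0 then true
  else pvAOuter doob (List.range (doob.headD []).length)

-- ===== PORT B =====
-- inner loop of B: 'for col in range(ncols): if row[col] == Waldo: found.add(col)'
def pvBRow (ncols : Nat) (found : PySem.Set Nat) (row : List String) : PySem.Set Nat :=
  (List.range ncols).foldl
    (fun f (c : Nat) => if PySem.List.pyGetD row (Int.ofNat c) "" = "W" then PySem.Set.add f c else f) found

def all_col_exists_waldo_alt (doob : List (List String)) : Bool :=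
  if doob.length = 0 then true
  else
    let ncols := (doob.headD []).length
    decide ((doob.foldl (pvBRow ncols) PySem.Set.empty).length = ncols)

-- ===== PRECONDITION & SPEC =====
-- Pre_ excludes jagged grids (a row shorter than the first row): there indexing row[col]
-- can raise IndexError, and whether A raises or returns depends on its column-major scan
-- order (A may return True while B's row-major scan raises); inside Pre_ both always return.
def Pre_all_col_exists_waldo (doob : List (List String)) : Prop :=
  ∀ row ∈ doob, (doob.headD []).length ≤ row.length
instance (doob : List (List String)) : Decidable (Pre_all_col_exists_waldo doob) := by
  unfold Pre_all_col_exists_waldo; infer_instance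

def pvWitness_all_col_exists_waldo : List (List String) := [["W", "x"], ["y", "W"]]

def Spec_all_col_exists_waldo (doob : List (List String)) (out : Bool) : Prop := out = all_col_exists_waldo_alt doob
instance (doob : List (List String)) (out : Bool) : Decidable (Spec_all_col_exists_waldo doob out) := by unfold Spec_all_col_exists_waldo; infer_instance

-- ===== CLAIM (what is proved, stated in full; the proofs are below) =====
def Claim_equal_all_col_exists_waldo : Prop := ∀ (doob : List (List String)), Dom_all_col_exists_waldo doob → Pre_all_col_exists_waldo doob → Spec_all_col_exists_waldo doob (all_col_exists_waldo doob)

-- ===== LEMMAS AND PROOFS =====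

-- the predicate both programs test at a grid cell
def pvHit (row : List String) (c : Nat) : Bool :=
  PySem.List.pyGetD row (Int.ofNat c) "" = "W"

theorem pvAInner_eq_any (c : Nat) (rows : List (List String)) :
    pvAInner c rows = rows.any (fun row => pvHit row c) := by
  induction rows with
  | nil => rfl
  | cons r rs ih =>
      simp only [pvAInner, List.any_cons, ih]
      split_ifs with h
      · have hh : pvHit r c = true := decide_eq_true h
        simp [hh]
      · have hh : pvHit r c = false := decide_eq_false h
        simp [hh]

theorem pvAOuter_eq_all (doob : List (List String)) (cs : List Nat) :
    pvAOuter doob cs = cs.all (fun c => pvAInner c doob) := by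
  induction cs with
  | nil => rfl
  | cons c cs ih =>
      simp only [pvAOuter, List.all_cons, ih]
      split_ifs with h <;> simp [h]

theorem mem_pvBRow (ncols : Nat) (s : PySem.Set Nat) (row : List String) (c : Nat) :
    c ∈ pvBRow ncols s row ↔ c ∈ s ∨ (c < ncols ∧ pvHit row c) := by
  unfold pvBRow
  have h : ∀ (l : List Nat) (s : PySem.Set Nat),
      c ∈ l.foldl (fun f (c : Nat) => if PySem.List.pyGetD row (Int.ofNat c) "" = "W" then PySem.Set.add f c else f) s
        ↔ c ∈ s ∨ (c ∈ l ∧ pvHit row c) := by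
    intro l
    induction l with
    | nil => simp
    | cons x xs ih =>
        intro s
        simp only [List.foldl_cons, ih]
        split_ifs with hx
        · rw [PySem.Set.mem_add]
          constructor
          · rintro ((h | h) | ⟨h1, h2⟩)
            · exact Or.inl h
            · subst h; exact Or.inr ⟨by simp, decide_eq_true hx⟩
            · exact Or.inr ⟨by simp [h1], h2⟩
          · rintro (h | ⟨h1, h2⟩)
            · exact Or.inl (Or.inl h)
            · rcases List.mem_cons.1 h1 with h1 | h1
              · exact Or.inl (Or.inr h1)
              · exact Or.inr ⟨h1, h2⟩
        · constructor
          · rintro (h | ⟨h1, h2⟩)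
            · exact Or.inl h
            · exact Or.inr ⟨by simp [h1], h2⟩
          · rintro (h | ⟨h1, h2⟩)
            · exact Or.inl h
            · rcases List.mem_cons.1 h1 with h1 | h1
              · subst h1; exact absurd (of_decide_eq_true h2) hx
              · exact Or.inr ⟨h1, h2⟩
  rw [h]
  simp [List.mem_range]

theorem nodup_pvBRow (ncols : Nat) (s : PySem.Set Nat) (row : List String)
    (hs : s.Nodup) : (pvBRow ncols s row).Nodup := by
  unfold pvBRow
  induction (List.range ncols) generalizing s with
  | nil => exact hs
  | cons x xs ih =>
      simp only [List.foldl_cons]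
      split_ifs with hx
      · exact ih _ (PySem.Set.nodup_add _ _ hs)
      · exact ih _ hs

theorem mem_pvBFold (ncols : Nat) (doob : List (List String)) (s : PySem.Set Nat) (c : Nat) :
    c ∈ doob.foldl (pvBRow ncols) s
      ↔ c ∈ s ∨ (c < ncols ∧ doob.any (fun row => pvHit row c)) := by
  induction doob generalizing s with
  | nil => simp
  | cons r rs ih =>
      simp only [List.foldl_cons, ih, mem_pvBRow, List.any_cons]
      constructor
      · rintro ((h | ⟨h1, h2⟩) | ⟨h1, h2⟩)
        · exact Or.inl h
        · exact Or.inr ⟨h1, by simp [h2]⟩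
        · exact Or.inr ⟨h1, by simp [h2]⟩
      · rintro (h | ⟨h1, h2⟩)
        · exact Or.inl (Or.inl h)
        · rcases (by simpa using h2 : pvHit r c = true ∨ rs.any (fun row => pvHit row c) = true) with h | h
          · exact Or.inl (Or.inr ⟨h1, h⟩)
          · exact Or.inr ⟨h1, h⟩

theorem nodup_pvBFold (ncols : Nat) (doob : List (List String)) (s : PySem.Set Nat)
    (hs : s.Nodup) : (doob.foldl (pvBRow ncols) s).Nodup := by
  induction doob generalizing s with
  | nil => exact hs
  | cons r rs ih => exact ih _ (nodup_pvBRow _ _ _ hs)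

-- B's final size test equals "every column index below ncols is hit in some row"
theorem pvB_length_iff (ncols : Nat) (doob : List (List String)) :
    ((doob.foldl (pvBRow ncols) PySem.Set.empty).length = ncols)
      ↔ ∀ c < ncols, doob.any (fun row => pvHit row c) := by
  set found := doob.foldl (pvBRow ncols) PySem.Set.empty with hf
  have hmem : ∀ c, c ∈ found ↔ c < ncols ∧ doob.any (fun row => pvHit row c) := by
    intro c; rw [hf, mem_pvBFold]; simp [PySem.Set.empty]
  have hnd : found.Nodup := nodup_pvBFold _ _ _ (by simp [PySem.Set.empty])
  have hsub : found ⊆ List.range ncols := by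
    intro c hc; rw [List.mem_range]; exact ((hmem c).1 hc).1
  have hsp : List.Subperm found (List.range ncols) := hnd.subperm hsub
  constructor
  · intro hlen c hc
    have hperm : found.Perm (List.range ncols) :=
      hsp.perm_of_length_le (by simp [hlen])
    have : c ∈ found := hperm.symm.subset (by simpa [List.mem_range] using hc)
    exact ((hmem c).1 this).2
  · intro hall
    have hsub2 : List.range ncols ⊆ found := by
      intro c hc
      rw [hmem]
      exact ⟨List.mem_range.1 hc, hall c (List.mem_range.1 hc)⟩
    have hperm : found.Perm (List.range ncols) :=
      hsp.antisymm ((List.nodup_range).subperm hsub2)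
    simpa using hperm.length_eq

-- ===== VERDICT (by name: the statement is the Claim_ definition above) =====
theorem all_col_exists_waldo_spec : Claim_equal_all_col_exists_waldo := by
  intro doob _ _
  unfold Spec_all_col_exists_waldo all_col_exists_waldo all_col_exists_waldo_alt
  by_cases h0 : doob.length = 0
  · simp [h0]
  · simp only [h0, if_false]
    rw [pvAOuter_eq_all]
    rcases Bool.eq_false_or_eq_true
        (decide ((doob.foldl (pvBRow (doob.headD []).length) PySem.Set.empty).length
          = (doob.headD []).length)) with hd | hd <;>
      rw [hd]
    · -- B says all columns are covered
      have hall := (pvB_length_iff _ _).1 (of_decide_eq_true hd)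
      simp only [List.all_eq_true]
      intro c hc
      rw [pvAInner_eq_any]
      exact hall c (List.mem_range.1 hc)
    · -- B says some column is missed
      have hne := of_decide_eq_false hd
      have hx := (not_iff_not.2 (pvB_length_iff (doob.headD []).length doob)).1 hne
      push Not at hx
      obtain ⟨c, hc, hcf⟩ := hx
      rw [List.all_eq_false]
      exact ⟨c, List.mem_range.2 hc, by rw [pvAInner_eq_any]; exact hcf⟩
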